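-- pv_equiv track=rewrite | github.com/sunnweiwei/AgentArena | agent_service/repo_agent.py | handle_summarize_context
-- ===== SOURCE A (Python) =====
-- def handle_summarize_context(conversation):
--     sum_left_key = "<|think|>For this question, AI have already made the following progress in previous session, summarized as follow:"
--     sum_right_key = "Now continue work on it.<|/think|>"
--     new_conversation = conversation[:3]
--     for turn in conversation[3:]:
--         if turn['role'] == 'assistant':
--             content = turn.get('content', '')
--             if sum_left_key in content and sum_right_key in content:
--                 new_conversation = conversation[:3]
--                 left_idx = content.find(sum_left_key)
--                 right_idx = content.find(sum_right_key) + len(sum_right_key)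
--                 summary_content = content[left_idx:right_idx].strip().replace('<|think|>', '').replace('<|/think|>', '')
--                 remaining_content = content[right_idx + len(sum_right_key):].strip()
--                 new_conversation.append({'role': 'user', 'content': summary_content})
--                 if remaining_content:
--                     new_conversation.append({'role': 'assistant', 'content': remaining_content})
--             else:
--                 new_conversation.append(turn)
--         else:
--             new_conversation.append(turn)
--     return new_conversation
-- ===== SOURCE B (Python) =====
-- SUM_LEFT_KEY = "<|think|>For this question, AI have already made the following progress in previous session, summarized as follow:"
-- SUM_RIGHT_KEY = "Now continue work on it.<|/think|>"
--
--
-- def _content(turn):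
--     return turn.get('content', '')
--
--
-- def _is_summary(turn):
--     c = _content(turn)
--     return turn.get('role') == 'assistant' and SUM_LEFT_KEY in c and SUM_RIGHT_KEY in c
--
--
-- def _build_turns(content):
--     right_idx = content.find(SUM_RIGHT_KEY) + len(SUM_RIGHT_KEY)
--     summary = content[content.find(SUM_LEFT_KEY):right_idx].strip().replace('<|think|>', '').replace('<|/think|>', '')
--     remaining = content[right_idx + len(SUM_RIGHT_KEY):].strip()
--     turns = [{'role': 'user', 'content': summary}]
--     if remaining:
--         turns.append({'role': 'assistant', 'content': remaining})
--     return turns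
--
--
-- def handle_summarize_context(conversation):
--     # Backward search: only the LAST summary turn matters, so scan the tail from
--     # the end; on the first hit splice by slicing, otherwise return unchanged.
--     head, tail = conversation[:3], conversation[3:]
--     for i in reversed(range(len(tail))):
--         if _is_summary(tail[i]):
--             return head + _build_turns(_content(tail[i])) + tail[i + 1:]
--     return head + tail
-- ===== Notes on version B (the rewrite author's own statement) =====
-- stated objective: alternative
-- what changed: A makes a forward pass that rebuilds the output inside the loop, resetting the accumulator to conversation[:3] at every summary turn; B scans the tail BACKWARD for the last summary turn, returns early on the first hit and splices the result together by list slicing, never maintaining an output accumulator.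
import Mathlib
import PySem

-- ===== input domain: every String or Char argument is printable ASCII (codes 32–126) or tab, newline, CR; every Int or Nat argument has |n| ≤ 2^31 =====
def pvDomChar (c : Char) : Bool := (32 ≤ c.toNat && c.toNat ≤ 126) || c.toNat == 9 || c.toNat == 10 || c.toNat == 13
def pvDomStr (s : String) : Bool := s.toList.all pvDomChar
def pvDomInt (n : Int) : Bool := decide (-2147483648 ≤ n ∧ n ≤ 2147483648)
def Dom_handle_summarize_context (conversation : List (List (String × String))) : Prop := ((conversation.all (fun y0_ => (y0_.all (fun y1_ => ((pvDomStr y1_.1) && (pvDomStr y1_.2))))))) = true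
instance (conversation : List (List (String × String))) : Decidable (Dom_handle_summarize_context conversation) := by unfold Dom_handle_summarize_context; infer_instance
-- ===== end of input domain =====

-- B replaces A's forward reset-accumulate pass by a BACKWARD scan for the last
-- summary turn with an early return and slice-splicing (objective: alternative).
-- Turns are Python dicts, ported as association lists (first-match lookup).

def pvSumLeftKey : String := "<|think|>For this question, AI have already made the following progress in previous session, summarized as follow:"
def pvSumRightKey : String := "Now continue work on it.<|/think|>"

-- ===== PORT A =====
-- turn['role'] is ported total as (lookup).getD ""; exact under Pre_ (the key is present).
def handle_summarize_context (conversation : List (List (String × String))) : List (List (String × String)) :=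
  (PySem.List.slice conversation (some 3) none).foldl
    (fun new_conversation turn =>
      if (List.lookup "role" turn).getD "" = "assistant" then
        let content := (List.lookup "content" turn).getD ""
        if PySem.Str.isIn pvSumLeftKey content && PySem.Str.isIn pvSumRightKey content then
          let new2 := PySem.List.slice conversation none (some 3)
          let left_idx := PySem.Str.find content pvSumLeftKey
          let right_idx := PySem.Str.find content pvSumRightKey + PySem.Str.len pvSumRightKey
          let summary_content := PySem.Str.replace (PySem.Str.replace (PySem.Str.strip (PySem.Str.slice content (some left_idx) (some right_idx))) "<|think|>" "") "<|/think|>" ""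
          let remaining_content := PySem.Str.strip (PySem.Str.slice content (some (right_idx + PySem.Str.len pvSumRightKey)) none)
          (new2 ++ [[("role", "user"), ("content", summary_content)]]) ++
            (if remaining_content ≠ "" then [[("role", "assistant"), ("content", remaining_content)]] else [])
        else new_conversation ++ [turn]
      else new_conversation ++ [turn])
    (PySem.List.slice conversation none (some 3))

-- ===== PORT B =====
def pvContent (turn : List (String × String)) : String :=
  (List.lookup "content" turn).getD ""

def pvIsSummary (turn : List (String × String)) : Bool :=
  ((List.lookup "role" turn).getD "" == "assistant")
    && PySem.Str.isIn pvSumLeftKey (pvContent turn)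
    && PySem.Str.isIn pvSumRightKey (pvContent turn)

def pvBuildTurns (content : String) : List (List (String × String)) :=
  let right_idx := PySem.Str.find content pvSumRightKey + PySem.Str.len pvSumRightKey
  let summary := PySem.Str.replace (PySem.Str.replace (PySem.Str.strip (PySem.Str.slice content (some (PySem.Str.find content pvSumLeftKey)) (some right_idx))) "<|think|>" "") "<|/think|>" ""
  let remaining := PySem.Str.strip (PySem.Str.slice content (some (right_idx + PySem.Str.len pvSumRightKey)) none)
  [("role", "user"), ("content", summary)] ::
    (if remaining ≠ "" then [[("role", "assistant"), ("content", remaining)]] else [])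

-- the backward `for i in reversed(range(len(tail)))` loop of Source B, with its early return;
-- tail[i] is ported as getD (i is a valid index for every i fed to the loop), tail[i+1:] as drop (i+1 ≥ 0)
def pvRevLoop (head tail : List (List (String × String))) : List Nat → List (List (String × String))
  | [] => head ++ tail
  | i :: rest =>
    let t := tail.getD i []
    if pvIsSummary t then head ++ pvBuildTurns (pvContent t) ++ tail.drop (i + 1)
    else pvRevLoop head tail rest

def handle_summarize_context_alt (conversation : List (List (String × String))) : List (List (String × String)) :=
  let head := PySem.List.slice conversation none (some 3)
  let tail := PySem.List.slice conversation (some 3) none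
  pvRevLoop head tail (List.range tail.length).reverse

-- ===== PRECONDITION & SPEC =====
-- Pre_ excludes (a) turns with duplicate keys, where the Python-dict / association-list
-- correspondence is ambiguous (dict construction collapses duplicates), and (b) turns past
-- the first three lacking a "role" key, on which A raises KeyError.
def Pre_handle_summarize_context (conversation : List (List (String × String))) : Prop :=
  (∀ turn ∈ conversation, (turn.map Prod.fst).Nodup) ∧
  (∀ turn ∈ conversation.drop 3, (List.lookup "role" turn).isSome = true)
instance (conversation : List (List (String × String))) : Decidable (Pre_handle_summarize_context conversation) := by unfold Pre_handle_summarize_context; infer_instance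

def pvWitness_handle_summarize_context : (List (List (String × String))) :=
  [[("role", "user"), ("content", "hi")], [("role", "assistant"), ("content", "ok")],
   [("role", "user"), ("content", "go")], [("role", "assistant"), ("content", "done")]]

def Spec_handle_summarize_context (conversation : List (List (String × String))) (out : List (List (String × String))) : Prop := out = handle_summarize_context_alt conversation
instance (conversation : List (List (String × String))) (out : List (List (String × String))) : Decidable (Spec_handle_summarize_context conversation out) := by unfold Spec_handle_summarize_context; infer_instance

-- ===== CLAIM (what is proved, stated in full; the proofs are below) =====
def Claim_equal_handle_summarize_context : Prop := ∀ (conversation : List (List (String × String))), Dom_handle_summarize_context conversation → Pre_handle_summarize_context conversation → Spec_handle_summarize_context conversation (handle_summarize_context conversation)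

-- ===== LEMMAS AND PROOFS =====

-- proof-side middle ground: a fold computing (content of last summary turn, turns after it)
def pvStep (st : Option String × List (List (String × String))) (turn : List (String × String)) :
    Option String × List (List (String × String)) :=
  if pvIsSummary turn then (some (pvContent turn), []) else (st.1, st.2 ++ [turn])

def pvInterp (base : List (List (String × String))) (pending : Option String)
    (suffix : List (List (String × String))) : List (List (String × String)) :=
  match pending with
  | none => base ++ suffix
  | some c => base ++ pvBuildTurns c ++ suffix

-- A's loop computes pvInterp of the fold state
lemma pvFold_eq (base : List (List (String × String))) (tail : List (List (String × String))) :
    ∀ (pending : Option String) (suffix : List (List (String × String))),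
    List.foldl (fun new_conversation turn =>
      if (List.lookup "role" turn).getD "" = "assistant" then
        let content := (List.lookup "content" turn).getD ""
        if PySem.Str.isIn pvSumLeftKey content && PySem.Str.isIn pvSumRightKey content then
          let new2 := base
          let left_idx := PySem.Str.find content pvSumLeftKey
          let right_idx := PySem.Str.find content pvSumRightKey + PySem.Str.len pvSumRightKey
          let summary_content := PySem.Str.replace (PySem.Str.replace (PySem.Str.strip (PySem.Str.slice content (some left_idx) (some right_idx))) "<|think|>" "") "<|/think|>" ""
          let remaining_content := PySem.Str.strip (PySem.Str.slice content (some (right_idx + PySem.Str.len pvSumRightKey)) none)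
          (new2 ++ [[("role", "user"), ("content", summary_content)]]) ++
            (if remaining_content ≠ "" then [[("role", "assistant"), ("content", remaining_content)]] else [])
        else new_conversation ++ [turn]
      else new_conversation ++ [turn])
      (pvInterp base pending suffix) tail
    = pvInterp base ((List.foldl pvStep (pending, suffix) tail).1)
        ((List.foldl pvStep (pending, suffix) tail).2) := by
  induction tail with
  | nil => intro pending suffix; rfl
  | cons turn rest ih =>
    intro pending suffix
    simp only [List.foldl_cons]
    by_cases h : pvIsSummary turn = true
    · have h' := h
      simp only [pvIsSummary, Bool.and_eq_true, beq_iff_eq, pvContent] at h'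
      obtain ⟨⟨h1, h2⟩, h3⟩ := h'
      have hstep : (if (List.lookup "role" turn).getD "" = "assistant" then
            let content := (List.lookup "content" turn).getD ""
            if PySem.Str.isIn pvSumLeftKey content && PySem.Str.isIn pvSumRightKey content then
              let new2 := base
              let left_idx := PySem.Str.find content pvSumLeftKey
              let right_idx := PySem.Str.find content pvSumRightKey + PySem.Str.len pvSumRightKey
              let summary_content := PySem.Str.replace (PySem.Str.replace (PySem.Str.strip (PySem.Str.slice content (some left_idx) (some right_idx))) "<|think|>" "") "<|/think|>" ""
              let remaining_content := PySem.Str.strip (PySem.Str.slice content (some (right_idx + PySem.Str.len pvSumRightKey)) none)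
              (new2 ++ [[("role", "user"), ("content", summary_content)]]) ++
                (if remaining_content ≠ "" then [[("role", "assistant"), ("content", remaining_content)]] else [])
            else pvInterp base pending suffix ++ [turn]
          else pvInterp base pending suffix ++ [turn])
          = pvInterp base (some (pvContent turn)) [] := by
        rw [if_pos h1]
        simp only [h2, h3, Bool.and_self, if_pos]
        simp [pvInterp, pvBuildTurns, pvContent, List.append_assoc]
      rw [hstep, show pvStep (pending, suffix) turn = (some (pvContent turn), []) from by
        simp [pvStep, h]]
      exact ih (some (pvContent turn)) []
    · have hstep : (if (List.lookup "role" turn).getD "" = "assistant" then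
            let content := (List.lookup "content" turn).getD ""
            if PySem.Str.isIn pvSumLeftKey content && PySem.Str.isIn pvSumRightKey content then
              let new2 := base
              let left_idx := PySem.Str.find content pvSumLeftKey
              let right_idx := PySem.Str.find content pvSumRightKey + PySem.Str.len pvSumRightKey
              let summary_content := PySem.Str.replace (PySem.Str.replace (PySem.Str.strip (PySem.Str.slice content (some left_idx) (some right_idx))) "<|think|>" "") "<|/think|>" ""
              let remaining_content := PySem.Str.strip (PySem.Str.slice content (some (right_idx + PySem.Str.len pvSumRightKey)) none)
              (new2 ++ [[("role", "user"), ("content", summary_content)]]) ++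
                (if remaining_content ≠ "" then [[("role", "assistant"), ("content", remaining_content)]] else [])
            else pvInterp base pending suffix ++ [turn]
          else pvInterp base pending suffix ++ [turn])
          = pvInterp base pending (suffix ++ [turn]) := by
        by_cases h1 : (List.lookup "role" turn).getD "" = "assistant"
        · rw [if_pos h1]
          rcases Bool.eq_false_or_eq_true (PySem.Str.isIn pvSumLeftKey ((List.lookup "content" turn).getD "")
              && PySem.Str.isIn pvSumRightKey ((List.lookup "content" turn).getD "")) with hi | hi
          · exfalso
            simp only [Bool.and_eq_true] at hi
            obtain ⟨hL2, hR2⟩ := hi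
            refine h ?_
            unfold pvIsSummary pvContent
            rw [Bool.and_eq_true, Bool.and_eq_true]
            exact ⟨⟨by simp [h1], hL2⟩, hR2⟩
          · simp only [hi, Bool.false_eq_true, if_false]
            cases pending <;> simp [pvInterp, List.append_assoc]
        · rw [if_neg h1]
          cases pending <;> simp [pvInterp, List.append_assoc]
      rw [hstep, show pvStep (pending, suffix) turn = (pending, suffix ++ [turn]) from by
        simp [pvStep, h]]
      exact ih pending (suffix ++ [turn])

-- B's backward loop computes pvInterp of the same fold state
lemma pvRev_eq (head : List (List (String × String))) (ys : List (List (String × String))) :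
    ∀ (ext : List (List (String × String))),
    pvRevLoop head (ys ++ ext) (List.range ys.length).reverse
      = pvInterp head ((List.foldl pvStep (none, []) ys).1)
          ((List.foldl pvStep (none, []) ys).2 ++ ext) := by
  induction ys using List.reverseRecOn with
  | nil => intro ext; simp [pvRevLoop, pvInterp]
  | append_singleton ys t ih =>
    intro ext
    have hidx : (List.range (ys ++ [t]).length).reverse = ys.length :: (List.range ys.length).reverse := by
      simp [List.range_succ]
    have hget : (ys ++ [t] ++ ext).getD ys.length [] = t := by
      rw [List.append_assoc]
      simp [List.getD]
    rw [hidx]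
    show (let x := (ys ++ [t] ++ ext).getD ys.length [];
      if pvIsSummary x then head ++ pvBuildTurns (pvContent x) ++ (ys ++ [t] ++ ext).drop (ys.length + 1)
      else pvRevLoop head (ys ++ [t] ++ ext) (List.range ys.length).reverse) = _
    rw [show (let x := (ys ++ [t] ++ ext).getD ys.length [];
      if pvIsSummary x then head ++ pvBuildTurns (pvContent x) ++ (ys ++ [t] ++ ext).drop (ys.length + 1)
      else pvRevLoop head (ys ++ [t] ++ ext) (List.range ys.length).reverse)
      = (if pvIsSummary t then head ++ pvBuildTurns (pvContent t) ++ (ys ++ [t] ++ ext).drop (ys.length + 1)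
        else pvRevLoop head (ys ++ [t] ++ ext) (List.range ys.length).reverse) from by rw [hget]]
    have hdrop : (ys ++ [t] ++ ext).drop (ys.length + 1) = ext := by
      rw [List.append_assoc]
      rw [show ys.length + 1 = ys.length + 1 + 0 from rfl]
      simp
    by_cases h : pvIsSummary t = true
    · rw [if_pos h, hdrop]
      have : List.foldl pvStep (none, []) (ys ++ [t])
          = (some (pvContent t), []) := by
        rw [List.foldl_append]
        simp [pvStep, h]
      rw [this]
      simp [pvInterp]
    · rw [if_neg h]
      rw [List.append_assoc]
      have := ih ([t] ++ ext)
      rw [this]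
      have : List.foldl pvStep (none, []) (ys ++ [t])
          = ((List.foldl pvStep (none, []) ys).1, (List.foldl pvStep (none, []) ys).2 ++ [t]) := by
        rw [List.foldl_append]
        simp [pvStep, h]
      rw [this]
      cases (List.foldl pvStep (none, []) ys).1 <;> simp [pvInterp]

-- ===== VERDICT (by name: the statement is the Claim_ definition above) =====
theorem handle_summarize_context_spec : Claim_equal_handle_summarize_context := by
  intro conversation _ _
  unfold Spec_handle_summarize_context handle_summarize_context handle_summarize_context_alt
  have hA := pvFold_eq (PySem.List.slice conversation none (some 3))
    (PySem.List.slice conversation (some 3) none) none []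
  simp only [pvInterp, List.append_nil] at hA
  have hB := pvRev_eq (PySem.List.slice conversation none (some 3))
    (PySem.List.slice conversation (some 3) none) []
  simp only [List.append_nil] at hB
  rw [hA, hB]
  simp only [pvInterp]
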